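-- pv_equiv track=rewrite | github.com/tommyruin/MHXXSwitchSaveEditor | tools/hex_compare.py | find_bit_changes
-- ===== SOURCE A (Python) =====
-- def find_bit_changes(before_byte, after_byte):
--     """Find which specific bits changed in a byte"""
--     changed_bits = []
--     for bit in range(8):
--         mask = 1 << bit
--         before_bit = (before_byte & mask) >> bit
--         after_bit = (after_byte & mask) >> bit
--         if before_bit != after_bit:
--             changed_bits.append({
--                 'bit': bit,
--                 'before': before_bit,
--                 'after': after_bit
--             })
--     return changed_bits
-- ===== SOURCE B (Python) =====
-- def find_bit_changes(before_byte, after_byte):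
--     """Find which specific bits changed in a byte"""
--     def go(b, a, bit):
--         if bit == 8 or b == a:
--             return []
--         rest = go(b >> 1, a >> 1, bit + 1)
--         if b & 1 != a & 1:
--             return [{'bit': bit, 'before': b & 1, 'after': a & 1}] + rest
--         return rest
--     return go(before_byte, after_byte, 0)
-- ===== Notes on version B (the rewrite author's own statement) =====
-- stated objective: alternative
-- what changed: A scans a fixed range(8) index loop building a mask per index; B instead recurses on the two numbers themselves, halving them each step, testing parities, prepending entries on the way out of the recursion, and stopping early once the remaining shifted values are equal.
import Mathlib
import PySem

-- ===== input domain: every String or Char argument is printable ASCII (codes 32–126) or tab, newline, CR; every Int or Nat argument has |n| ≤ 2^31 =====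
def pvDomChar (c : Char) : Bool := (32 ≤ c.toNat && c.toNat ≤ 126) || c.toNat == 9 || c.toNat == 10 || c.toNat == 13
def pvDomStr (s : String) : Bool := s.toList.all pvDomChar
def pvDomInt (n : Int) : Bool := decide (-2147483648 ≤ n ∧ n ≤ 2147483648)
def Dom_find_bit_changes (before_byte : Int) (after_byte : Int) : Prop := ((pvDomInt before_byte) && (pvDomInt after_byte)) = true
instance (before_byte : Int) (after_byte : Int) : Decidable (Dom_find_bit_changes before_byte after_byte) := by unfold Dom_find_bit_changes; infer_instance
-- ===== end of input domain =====

-- B replaces A's indexed mask loop over range(8) by recursion on the halved numbers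
-- (parity test per step, early exit once the remaining bits are equal); objective: alternative.

-- ===== PORT A =====
-- `1 << bit` / `>> bit`: bit is the range(8) variable, always ≥ 0, so `.toNat` is exact here.
def find_bit_changes (before_byte : Int) (after_byte : Int) : List (List (String × Int)) :=
  (PySem.List.pyRange 0 8).foldl (fun changed_bits bit =>
    let mask : Int := (1 : Int) <<< bit.toNat
    let before_bit : Int := (PySem.Int.band before_byte mask) >>> bit.toNat
    let after_bit : Int := (PySem.Int.band after_byte mask) >>> bit.toNat
    if before_bit ≠ after_bit then
      changed_bits ++ [[("bit", bit), ("before", before_bit), ("after", after_bit)]]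
    else changed_bits) []

-- ===== PORT B =====
-- Port of Source B's inner `go`.  Python's guard is `bit == 8`; `8 ≤ bit` is the same test on every
-- reachable call (bit starts at 0 and increases by 1) and makes termination evident.
def pvGo (b : Int) (a : Int) (bit : Nat) : List (List (String × Int)) :=
  if 8 ≤ bit ∨ b = a then []
  else
    let rest := pvGo (b >>> 1) (a >>> 1) (bit + 1)
    if PySem.Int.band b 1 ≠ PySem.Int.band a 1 then
      [("bit", (bit : Int)), ("before", PySem.Int.band b 1), ("after", PySem.Int.band a 1)] :: rest
    else rest
termination_by 8 - bit
decreasing_by omega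

def find_bit_changes_alt (before_byte : Int) (after_byte : Int) : List (List (String × Int)) :=
  pvGo before_byte after_byte 0

-- ===== PRECONDITION & SPEC =====
def Spec_find_bit_changes (before_byte : Int) (after_byte : Int) (out : List (List (String × Int))) : Prop := out = find_bit_changes_alt before_byte after_byte
instance (before_byte : Int) (after_byte : Int) (out : List (List (String × Int))) : Decidable (Spec_find_bit_changes before_byte after_byte out) := by unfold Spec_find_bit_changes; infer_instance

-- ===== CLAIM (what is proved, stated in full; the proofs are below) =====
def Claim_equal_find_bit_changes : Prop := ∀ (before_byte : Int) (after_byte : Int), Dom_find_bit_changes before_byte after_byte → Spec_find_bit_changes before_byte after_byte (find_bit_changes before_byte after_byte)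

-- ===== LEMMAS AND PROOFS =====

-- reference list: entries for the j bits k, k+1, …, k+j-1 of the ORIGINAL two integers
def pvR (j : Nat) (B : Int) (A : Int) (k : Nat) : List (List (String × Int)) :=
  match j with
  | 0 => []
  | j + 1 =>
    (if PySem.Int.band (B >>> (k : Int)) 1 ≠ PySem.Int.band (A >>> (k : Int)) 1 then
      [[("bit", (k : Int)), ("before", PySem.Int.band (B >>> (k : Int)) 1), ("after", PySem.Int.band (A >>> (k : Int)) 1)]]
    else []) ++ pvR j B A (k + 1)

theorem pvShift1 (x : Int) (k : Nat) : (x >>> (k : Int)) >>> (1 : Int) = x >>> ((k + 1 : Nat) : Int) := by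
  have h := Int.shiftRight_add' x k 1
  push_cast at h ⊢
  exact h.symm

theorem pvShift0 (x : Int) : x >>> ((0 : Nat) : Int) = x := by
  cases x with
  | ofNat n => rw [Int.ofNat_eq_natCast, Int.shiftRight_natCast, Nat.shiftRight_zero]
  | negSucc n => rw [Int.shiftRight_negSucc, Nat.shiftRight_zero]

-- Nat core of the bit-extraction identity, nonnegative case
theorem pvNatBit (n k : Nat) : (n &&& 1 <<< k) >>> k = (n >>> k) &&& 1 := by
  have h1 : n &&& 1 <<< k = (n.testBit k).toNat * 2 ^ k := by
    rw [Nat.shiftLeft_eq, one_mul, Nat.and_two_pow]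
  rw [h1, Nat.shiftRight_eq_div_pow, Nat.shiftRight_eq_div_pow, Nat.and_one_is_mod,
      Nat.mul_div_cancel _ (Nat.two_pow_pos k)]
  have h := Nat.testBit_eq_decide_div_mod_eq (x := n) (i := k)
  have h2 : n / 2 ^ k % 2 < 2 := Nat.mod_lt _ (by norm_num)
  by_cases hb : n.testBit k <;> simp [hb] at h ⊢ <;> omega

-- Nat core, negative case (the bit of a negative a is the complement of the bit of m = -a-1)
theorem pvNatBitNeg (m k : Nat) : (1 <<< k - (1 <<< k &&& m)) >>> k = 1 - (1 &&& m >>> k) := by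
  have h1 : 1 <<< k &&& m = (m.testBit k).toNat * 2 ^ k := by
    rw [Nat.shiftLeft_eq, one_mul, Nat.and_comm, Nat.and_two_pow]
  rw [h1, Nat.shiftLeft_eq, one_mul, Nat.shiftRight_eq_div_pow, Nat.and_comm,
      Nat.and_one_is_mod, Nat.shiftRight_eq_div_pow]
  have h := Nat.testBit_eq_decide_div_mod_eq (x := m) (i := k)
  have h2 : m / 2 ^ k % 2 < 2 := Nat.mod_lt _ (by norm_num)
  by_cases hb : m.testBit k
  · simp [hb] at h ⊢
    omega
  · simp [hb] at h ⊢
    have h3 : m / 2 ^ k % 2 = 0 := by omega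
    rw [h3]

-- A's per-bit expression equals B's:  (a & (1 << k)) >> k  =  (a >> k) & 1
theorem pvBitEq (a : Int) (k : Nat) :
    (PySem.Int.band a ((1 : Int) <<< (k : Int))) >>> (k : Int) = PySem.Int.band (a >>> (k : Int)) 1 := by
  have hm : ((1 : Int) <<< (k : Int)) = ((1 <<< k : Nat) : Int) := by
    rw [show (1 : Int) = ((1 : Nat) : Int) by norm_num, Int.shiftLeft_natCast]
  cases a with
  | ofNat n =>
    rw [Int.ofNat_eq_natCast, hm, PySem.Int.band_natCast, Int.shiftRight_natCast,
        Int.shiftRight_natCast,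
        show (1 : Int) = ((1 : Nat) : Int) by norm_num, PySem.Int.band_natCast, pvNatBit]
  | negSucc n =>
    rw [hm]
    have hneg : ∀ (p : Nat), ¬ (0 : Int) ≤ Int.negSucc p := by
      intro p
      have := Int.natCast_nonneg p
      rw [Int.negSucc_eq]
      omega
    have hsub : ∀ (p : Nat), -(Int.negSucc p) - 1 = (p : Int) := by
      intro p
      rw [Int.negSucc_eq]
      ring
    have h2 : PySem.Int.band (Int.negSucc n) ((1 <<< k : Nat) : Int) = ((1 <<< k - (1 <<< k &&& n) : Nat) : Int) := by
      unfold PySem.Int.band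
      rw [if_neg (hneg n), if_pos (by positivity), hsub n]
      rw [Int.toNat_natCast, Int.toNat_natCast]
    have h3 : PySem.Int.band (Int.negSucc (n >>> k)) 1 = ((1 - (1 &&& n >>> k) : Nat) : Int) := by
      unfold PySem.Int.band
      rw [if_neg (hneg (n >>> k)), if_pos (by norm_num), hsub (n >>> k)]
      rw [Int.toNat_natCast]
      norm_num
    rw [h2, Int.shiftRight_natCast, Int.shiftRight_negSucc, h3, pvNatBitNeg]

-- if the integers agree from bit k upward, the reference list is empty
theorem pvR_eq_nil (j : Nat) (B A : Int) (k : Nat) (h : B >>> (k : Int) = A >>> (k : Int)) :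
    pvR j B A k = [] := by
  induction j generalizing k with
  | zero => rfl
  | succ j ih =>
    rw [pvR, h, ih (k + 1) (by rw [← pvShift1, ← pvShift1, h])]
    simp

-- B computes the reference list
theorem pvGo_eq_pvR (j : Nat) (B A : Int) (k : Nat) (hk : k + j = 8) :
    pvGo (B >>> (k : Int)) (A >>> (k : Int)) k = pvR j B A k := by
  induction j generalizing k with
  | zero =>
    rw [pvGo]
    simp [show (8 : Nat) ≤ k by omega, pvR]
  | succ j ih =>
    rw [pvGo]
    by_cases he : B >>> (k : Int) = A >>> (k : Int)
    · rw [if_pos (Or.inr he), pvR_eq_nil _ _ _ _ he]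
    · rw [if_neg (by push Not; exact ⟨by omega, he⟩)]
      rw [pvR]
      by_cases hb : PySem.Int.band (B >>> (k : Int)) 1 ≠ PySem.Int.band (A >>> (k : Int)) 1
      · rw [if_pos hb]
        simp only [pvShift1, ih (k + 1) (by omega)]
        simp [hb]
      · rw [if_neg hb]
        simp only [pvShift1, ih (k + 1) (by omega)]
        simp [hb]

-- A computes the reference list
theorem pvA_eq_pvR (j : Nat) (B A : Int) (k : Nat) (hk : k + j = 8) (acc : List (List (String × Int))) :
    (PySem.List.pyRange (k : Int) 8).foldl (fun changed_bits bit =>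
      let mask : Int := (1 : Int) <<< bit.toNat
      let before_bit : Int := (PySem.Int.band B mask) >>> bit.toNat
      let after_bit : Int := (PySem.Int.band A mask) >>> bit.toNat
      if before_bit ≠ after_bit then
        changed_bits ++ [[("bit", bit), ("before", before_bit), ("after", after_bit)]]
      else changed_bits) acc = acc ++ pvR j B A k := by
  induction j generalizing k acc with
  | zero =>
    have h8 : ((k : Nat) : Int) = (8 : Int) := by omega
    rw [h8, show PySem.List.pyRange (8 : Int) 8 = [] by decide]
    simp [pvR]
  | succ j ih =>
    rw [PySem.List.pyRange_one_cons (by omega), List.foldl_cons,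
        show ((k : Int) + 1) = ((k + 1 : Nat) : Int) by push_cast; ring,
        ih (k + 1) (by omega), pvR]
    simp only [Int.toNat_natCast, pvBitEq]
    by_cases hb : PySem.Int.band (B >>> (k : Int)) 1 ≠ PySem.Int.band (A >>> (k : Int)) 1
    · simp [hb, List.append_assoc]
    · simp [hb]

-- ===== VERDICT (by name: the statement is the Claim_ definition above) =====
theorem find_bit_changes_spec : Claim_equal_find_bit_changes := by
  intro B A _
  show find_bit_changes B A = find_bit_changes_alt B A
  have hA : find_bit_changes B A = [] ++ pvR 8 B A 0 := pvA_eq_pvR 8 B A 0 rfl []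
  have hB : find_bit_changes_alt B A = pvR 8 B A 0 := by
    have h := pvGo_eq_pvR 8 B A 0 rfl
    rw [pvShift0, pvShift0] at h
    exact h
  rw [hA, hB]
  rfl
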